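-- pv_equiv track=rewrite | github.com/Marina-Banov/Advent-of-Code | 2020/06.py | part_one
-- ===== SOURCE A (Python) =====
-- def part_one(lines):
--     all_sum = 0
--     group = []
--     for line in lines:
--         if line == "":
--             all_sum += len(group)
--             group = []
--             continue
--         for letter in line:
--             if not letter in group:
--                 group.append(letter)
--     return all_sum
-- ===== SOURCE B (Python) =====
-- def part_one(lines):
--     if "" not in lines:
--         return 0
--     i = lines.index("")
--     return len(set("".join(lines[:i]))) + part_one(lines[i + 1:])
-- ===== Notes on version B (the rewrite author's own statement) =====
-- stated objective: alternative
-- what changed: Recursive divide-and-conquer on the first blank line: split off the prefix before the first "", count distinct letters of set("".join(prefix)), and recurse on the suffix; no blank line means 0 (trailing group never counted) - replacing A's single-pass accumulator with incremental 'not in list' dedup.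
import Mathlib
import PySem

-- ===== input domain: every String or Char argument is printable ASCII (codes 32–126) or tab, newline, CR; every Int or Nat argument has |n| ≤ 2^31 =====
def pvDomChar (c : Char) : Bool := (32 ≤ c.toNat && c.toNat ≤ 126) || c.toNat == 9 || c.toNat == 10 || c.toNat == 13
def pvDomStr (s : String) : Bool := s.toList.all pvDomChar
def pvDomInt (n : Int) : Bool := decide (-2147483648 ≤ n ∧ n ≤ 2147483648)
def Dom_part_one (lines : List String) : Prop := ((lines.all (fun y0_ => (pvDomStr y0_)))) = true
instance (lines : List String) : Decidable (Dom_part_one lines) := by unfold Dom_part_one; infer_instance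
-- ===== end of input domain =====

-- B recurses on the first blank line (count distinct letters of the joined prefix, recurse
-- on the suffix after the blank) instead of A's single-pass accumulator; same value, alternative decomposition.

-- ===== PORT A =====
-- running state: (all_sum, group); inner loop appends letters not already in group
def partAStep (st : Int × List Char) (line : String) : Int × List Char :=
  if line = "" then (st.1 + st.2.length, [])
  else (st.1, line.toList.foldl (fun g c => if g.contains c then g else g ++ [c]) st.2)

def part_one (lines : List String) : Int :=
  (lines.foldl partAStep ((0 : Int), ([] : List Char))).1

-- ===== PORT B =====
-- if "" not in lines: return 0; i = lines.index(""); len(set("".join(lines[:i]))) + part_one(lines[i+1:])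
-- lines[:i] with 0 ≤ i is exactly List.take i; lines[i+1:] with 0 ≤ i+1 is exactly List.drop (i+1)
def part_one_alt (lines : List String) : Int :=
  match h : PySem.List.index? lines "" with
  | none => 0
  | some i =>
      ((PySem.Set.ofList (PySem.Str.join "" (lines.take i)).toList).length : Int)
        + part_one_alt (lines.drop (i + 1))
termination_by lines.length
decreasing_by
  obtain ⟨hk, -, -⟩ := PySem.List.getElem_of_index?_eq_some h
  simp only [List.length_drop]
  omega

-- ===== PRECONDITION & SPEC =====
def Spec_part_one (lines : List String) (out : Int) : Prop := out = part_one_alt lines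
instance (lines : List String) (out : Int) : Decidable (Spec_part_one lines out) := by unfold Spec_part_one; infer_instance

-- ===== CLAIM =====
def Claim_equal_part_one : Prop := ∀ (lines : List String), Dom_part_one lines → Spec_part_one lines (part_one lines)

-- ===== LEMMAS AND PROOFS =====

-- "".join concatenates the characters
theorem chars_join_empty (css : List (List Char)) :
    PySem.Chars.join [] css = css.flatten := by
  match css with
  | [] => simp [PySem.Chars.join_nil]
  | [p] => simp [PySem.Chars.join_singleton]
  | p :: q :: rest =>
      rw [PySem.Chars.join_cons_cons, chars_join_empty (q :: rest)]
      simp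

theorem join_empty_toList (ss : List String) :
    (PySem.Str.join "" ss).toList = (ss.map String.toList).flatten := by
  simp [chars_join_empty]

-- A's inner letter loop is exactly Set.update
theorem inner_eq_update (cs : List Char) (g : List Char) :
    cs.foldl (fun g c => if g.contains c then g else g ++ [c]) g = PySem.Set.update g cs := by
  induction cs generalizing g with
  | nil => simp [PySem.Set.update]
  | cons c cs ih => simp [PySem.Set.update, List.foldl, PySem.Set.add] at *; simp [ih]

-- proof helper: A's remaining sum starting from group g
def Gacc (g : PySem.Set Char) (lines : List String) : Int :=
  match PySem.List.index? lines "" with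
  | none => 0
  | some i =>
      ((PySem.Set.update g (PySem.Str.join "" (lines.take i)).toList).length : Int)
        + part_one_alt (lines.drop (i + 1))

theorem update_nil (g : PySem.Set Char) : PySem.Set.update g [] = g := rfl

theorem update_append (g : PySem.Set Char) (xs ys : List Char) :
    PySem.Set.update g (xs ++ ys) = PySem.Set.update (PySem.Set.update g xs) ys := by
  simp [PySem.Set.update, List.foldl_append]

theorem gacc_nil_eq_alt (lines : List String) : Gacc [] lines = part_one_alt lines := by
  rw [part_one_alt, Gacc]
  cases h : PySem.List.index? lines "" with
  | none => rfl
  | some i => simp [PySem.Set.update, PySem.Set.ofList_eq_foldl]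

theorem gacc_cons_ne (l : String) (ls : List String) (g : PySem.Set Char) (h : l ≠ "") :
    Gacc g (l :: ls) = Gacc (PySem.Set.update g l.toList) ls := by
  unfold Gacc
  rw [PySem.List.index?_cons_of_ne ls h]
  cases hi : PySem.List.index? ls "" with
  | none => rfl
  | some i =>
      simp only [Option.map_some]
      have ht : (l :: ls).take (i + 1) = l :: ls.take i := by simp
      have hj : (PySem.Str.join "" ((l :: ls).take (i + 1))).toList
          = l.toList ++ (PySem.Str.join "" (ls.take i)).toList := by
        rw [ht, join_empty_toList, join_empty_toList]; simp
      rw [hj, update_append]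
      rfl

theorem main_inv (lines : List String) (a : Int) (g : PySem.Set Char) :
    (lines.foldl partAStep (a, g)).1 = a + Gacc g lines := by
  induction lines generalizing a g with
  | nil => simp [Gacc, PySem.List.index?_eq_idxOf?]
  | cons l ls ih =>
    by_cases h : l = ""
    · subst h
      rw [List.foldl_cons, show partAStep (a, g) "" = (a + (g.length : Int), []) from by
        simp [partAStep], ih]
      have hb : Gacc g ("" :: ls) = (g.length : Int) + part_one_alt ls := by
        rw [Gacc, PySem.List.index?_cons_self]
        simp only [List.take_zero, List.drop_succ_cons, List.drop_zero]
        have hj : (PySem.Str.join "" ([] : List String)).toList = [] := by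
          simp
        rw [hj, update_nil]
      rw [hb, gacc_nil_eq_alt]
      ring
    · rw [List.foldl_cons, show partAStep (a, g) l = (a, PySem.Set.update g l.toList) from by
        simp only [partAStep, if_neg h]; rw [inner_eq_update], ih, gacc_cons_ne l ls g h]

-- ===== VERDICT =====
theorem part_one_spec : Claim_equal_part_one := by
  intro lines _
  unfold Spec_part_one part_one
  rw [main_inv]
  simp [gacc_nil_eq_alt]
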